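-- pv_equiv track=rewrite | github.com/an2050/titop-tactic | _lib/processVariables.py | collectProjectVariables
-- ===== SOURCE A (Python) =====
-- def collectProjectVariables(configFileList):
--     configFileList = [f.replace("\\config.json", "") for f in configFileList[1:]]
--     projectVariables = dict()
--     try:
--         projectVariables['PRJ'] = configFileList[0]
--     except IndexError:
--         pass
--     try:
--         projectVariables['EPISOD'] = configFileList[1]
--     except IndexError:
--         pass
--     try:
--         projectVariables['SHOT'] = configFileList[2]
--     except IndexError:
--         pass
--     return projectVariables
-- ===== SOURCE B (Python) =====
-- def collectProjectVariables(configFileList):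
--     def pair(keys, files):
--         if not keys or not files:
--             return {}
--         entry = {keys[0]: files[0].replace("\\config.json", "")}
--         entry.update(pair(keys[1:], files[1:]))
--         return entry
--     return pair(['PRJ', 'EPISOD', 'SHOT'], configFileList[1:])
-- ===== Notes on version B (the rewrite author's own statement) =====
-- stated objective: alternative
-- what changed: Replaces the three positional try/except-IndexError dict assignments with a recursion that consumes the three fixed keys and configFileList[1:] in parallel, merging each recursive result into a one-entry dict via dict.update, so there is no indexing and no exception handling.
import Mathlib
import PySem

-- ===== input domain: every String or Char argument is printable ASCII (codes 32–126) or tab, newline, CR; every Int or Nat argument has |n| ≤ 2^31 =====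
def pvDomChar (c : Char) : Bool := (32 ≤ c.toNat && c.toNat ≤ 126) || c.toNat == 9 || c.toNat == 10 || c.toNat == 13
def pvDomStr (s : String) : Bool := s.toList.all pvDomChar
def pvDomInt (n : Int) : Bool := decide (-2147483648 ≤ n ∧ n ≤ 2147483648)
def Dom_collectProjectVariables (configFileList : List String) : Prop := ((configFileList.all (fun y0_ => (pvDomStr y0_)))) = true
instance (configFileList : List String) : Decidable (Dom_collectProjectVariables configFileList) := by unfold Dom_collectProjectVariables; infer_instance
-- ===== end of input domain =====

-- B replaces A's three positional try/except-IndexError assignments with a recursion that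
-- consumes the key list and the file list in parallel, merging each recursive result into a
-- one-entry dict with dict.update (objective: alternative decomposition).

-- ===== PORT A =====
def collectProjectVariables (configFileList : List String) : List (String × String) :=
  let lst := (PySem.List.slice configFileList (some 1) none).map
      (fun f => PySem.Str.replace f "\\config.json" "")
  let d0 : PySem.Dict String String := PySem.Dict.empty
  let d1 := match PySem.List.pyGet? lst 0 with
    | some v => d0.insert "PRJ" v
    | none => d0
  let d2 := match PySem.List.pyGet? lst 1 with
    | some v => d1.insert "EPISOD" v
    | none => d1
  let d3 := match PySem.List.pyGet? lst 2 with
    | some v => d2.insert "SHOT" v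
    | none => d2
  d3.items

-- ===== PORT B =====
-- recursive helper 'pair' of Source B: base cases for either list empty, otherwise a one-entry
-- dict updated with the recursive result on the two tails
def pvPair : List String → List String → PySem.Dict String String
  | [], _ => PySem.Dict.empty
  | _ :: _, [] => PySem.Dict.empty
  | k :: ks, f :: fs =>
      ((PySem.Dict.empty).insert k (PySem.Str.replace f "\\config.json" "")).update
        (pvPair ks fs).items

def collectProjectVariables_alt (configFileList : List String) : List (String × String) :=
  (pvPair ["PRJ", "EPISOD", "SHOT"]
    (PySem.List.slice configFileList (some 1) none)).items

-- ===== PRECONDITION & SPEC =====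
def Spec_collectProjectVariables (configFileList : List String) (out : List (String × String)) : Prop := out = collectProjectVariables_alt configFileList
instance (configFileList : List String) (out : List (String × String)) : Decidable (Spec_collectProjectVariables configFileList out) := by unfold Spec_collectProjectVariables; infer_instance

-- ===== CLAIM (what is proved, stated in full; the proofs are below) =====
def Claim_equal_collectProjectVariables : Prop := ∀ (configFileList : List String), Dom_collectProjectVariables configFileList → Spec_collectProjectVariables configFileList (collectProjectVariables configFileList)

-- ===== LEMMAS AND PROOFS =====

-- ===== VERDICT (by name: the statement is the Claim_ definition above) =====
theorem collectProjectVariables_spec : Claim_equal_collectProjectVariables := by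
  intro l _
  unfold Spec_collectProjectVariables
  match l with
  | [] => rfl
  | [_] => rfl
  | [_, _] => rfl
  | [_, _, _] => rfl
  | _ :: _ :: _ :: _ :: rest =>
    simp [collectProjectVariables, collectProjectVariables_alt, pvPair,
      PySem.List.slice_from_one, PySem.List.pyGet?_of_nonneg,
      PySem.Dict.update, PySem.Dict.insert, PySem.Dict.empty]
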